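-- pv_equiv track=rewrite | github.com/jjweidon/exct | programmers/조이스틱.py | solution
-- ===== SOURCE A (Python) =====
-- def solution(name):
--     answer = 0
--     lsts = []
--     zeros = []
--     for i, x in enumerate(name):
--         num = min(ord(x) - 65, 91 - ord(x))
--         lsts.append(num)
--         if num == 0:
--             zeros.append(i)
--
--     cuts = []
--     temp = []
--     for i in range(len(zeros)):
--         if not temp:
--             temp.append(zeros[i])
--         else:
--             if zeros[i] - temp[-1] == 1:
--                 temp.append(zeros[i])
--             else:
--                 cuts.append((temp[0], temp[-1]))
--                 temp = [zeros[i]]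
--     if temp:
--         cuts.append((temp[0], temp[-1]))
--
--     move = len(name) - 1
--     for cut in cuts:
--         minc, maxc = min(cut[0] - 1, len(lsts) - cut[1] - 1), max(cut[0] - 1, len(lsts) - cut[1] - 1)
--         minc = 0 if minc < 0 else minc
--         maxc = 0 if maxc < 0 else maxc
--         move = min(move, minc * 2 + maxc)
--
--     return sum(lsts) + move
-- ===== SOURCE B (Python) =====
-- def solution(name):
--     costs = [min(ord(c) - 65, 91 - ord(c)) for c in name]
--     n = len(costs)
--     move = n - 1
--     for i in range(n):
--         nxt = i + 1
--         while nxt < n and costs[nxt] == 0: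
--             nxt += 1
--         move = min(move, 2 * i + (n - nxt), i + 2 * (n - nxt))
--     return sum(costs) + move
-- ===== Notes on version B (the rewrite author's own statement) =====
-- stated objective: idiomatic
-- what changed: Replaces A's three-pass pipeline (build zeros list, group it into maximal runs via a cuts/temp state machine, then minimise over cuts) with the canonical single greedy loop that, for each index i, scans forward over zero-cost letters to find nxt and takes min(move, 2*i+(n-nxt), i+2*(n-nxt)); no zeros/cuts lists are materialised.
import Mathlib
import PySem

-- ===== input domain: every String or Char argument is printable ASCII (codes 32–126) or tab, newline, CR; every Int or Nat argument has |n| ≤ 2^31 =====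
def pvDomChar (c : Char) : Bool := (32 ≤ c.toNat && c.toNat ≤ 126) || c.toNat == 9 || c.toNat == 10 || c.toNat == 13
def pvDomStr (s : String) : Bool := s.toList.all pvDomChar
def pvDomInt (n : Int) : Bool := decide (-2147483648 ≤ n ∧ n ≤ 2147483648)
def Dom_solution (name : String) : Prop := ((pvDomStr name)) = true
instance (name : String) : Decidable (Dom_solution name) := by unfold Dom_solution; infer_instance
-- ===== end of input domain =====

-- B rewrites A's three-pass cuts-list construction as the canonical single greedy loop that
-- scans forward from each index over zero-cost letters (objective: idiomatic/simpler).

-- shared by both ports: Python's min(ord(x) - 65, 91 - ord(x)), the per-letter up/down cost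
def pvCost (c : Char) : Int := min ((c.toNat : Int) - 65) (91 - (c.toNat : Int))

-- ===== PORT A =====
def solution (name : String) : Int :=
  -- for i, x in enumerate(name): build lsts (costs) and zeros (indices with cost 0)
  let st := (PySem.List.enumerate name.toList 0).foldl
    (fun (st : List Int × List Int) p =>
      let num := pvCost p.2
      (st.1 ++ [num], if num = 0 then st.2 ++ [p.1] else st.2)) ([], [])
  let lsts := st.1
  let zeros := st.2
  -- for i in range(len(zeros)): group consecutive zero indices, state = (cuts, temp)
  let ct := (PySem.List.pyRange 0 (PySem.List.len zeros) 1).foldl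
    (fun (ct : List (Int × Int) × List Int) i =>
      let z := PySem.List.pyGetD zeros i 0       -- zeros[i] (always in range here)
      if ct.2 = [] then (ct.1, ct.2 ++ [z])
      else if z - PySem.List.pyGetD ct.2 (-1) 0 = 1 then (ct.1, ct.2 ++ [z])
      else (ct.1 ++ [(PySem.List.pyGetD ct.2 0 0, PySem.List.pyGetD ct.2 (-1) 0)], [z]))
    ([], [])
  let cuts := if ct.2 ≠ [] then
      ct.1 ++ [(PySem.List.pyGetD ct.2 0 0, PySem.List.pyGetD ct.2 (-1) 0)]
    else ct.1
  -- for cut in cuts: move = min(move, minc*2 + maxc)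
  let move := cuts.foldl
    (fun move cut =>
      let minc0 := min (cut.1 - 1) (PySem.List.len lsts - cut.2 - 1)
      let maxc0 := max (cut.1 - 1) (PySem.List.len lsts - cut.2 - 1)
      let minc := if minc0 < 0 then 0 else minc0
      let maxc := if maxc0 < 0 then 0 else maxc0
      min move (minc * 2 + maxc))
    (PySem.Str.len name - 1)
  lsts.sum + move

-- ===== PORT B =====
-- while nxt < n and costs[nxt] == 0: nxt += 1
def pvNext (costs : List Int) (n : Int) (nxt : Int) : Int :=
  if h : nxt < n ∧ PySem.List.pyGetD costs nxt 0 = 0 then pvNext costs n (nxt + 1) else nxt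
termination_by (n - nxt).toNat
decreasing_by omega

def solution_alt (name : String) : Int :=
  let costs := name.toList.map pvCost
  let n : Int := PySem.List.len costs
  let move := (PySem.List.pyRange 0 n 1).foldl
    (fun move i =>
      let nxt := pvNext costs n (i + 1)
      min (min move (2 * i + (n - nxt))) (i + 2 * (n - nxt)))
    (n - 1)
  costs.sum + move

-- ===== PRECONDITION & SPEC =====
def Spec_solution (name : String) (out : Int) : Prop := out = solution_alt name
instance (name : String) (out : Int) : Decidable (Spec_solution name out) := by unfold Spec_solution; infer_instance

-- ===== CLAIM (what is proved, stated in full; the proofs are below) =====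
def Claim_equal_solution : Prop := ∀ (name : String), Dom_solution name → Spec_solution name (solution name)

-- ===== LEMMAS AND PROOFS =====

-- zero-index list produced by A's first loop, in closed recursive form
def pvZAux : List Char → Int → List Int
  | [], _ => []
  | c :: rest, s => if pvCost c = 0 then s :: pvZAux rest (s + 1) else pvZAux rest (s + 1)

-- reference form of A's grouping loop: current run starts at l, last element cur
def pvGrpAux (l cur : Int) : List Int → List (Int × Int)
  | [] => [(l, cur)]
  | z :: zs => if z - cur = 1 then pvGrpAux l z zs else (l, cur) :: pvGrpAux z z zs

-- (l, r) is a maximal run of zero-cost positions of cs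
def pvIsCut (cs : List Int) (l r : Int) : Prop :=
  0 ≤ l ∧ l ≤ r ∧ r < (cs.length : Int) ∧
  (∀ j, l ≤ j → j ≤ r → PySem.List.pyGetD cs j 0 = 0) ∧
  (l = 0 ∨ PySem.List.pyGetD cs (l - 1) 0 ≠ 0) ∧
  (r = (cs.length : Int) - 1 ∨ PySem.List.pyGetD cs (r + 1) 0 ≠ 0)

theorem pvZAux_mem (l : List Char) (s z : Int) :
    z ∈ pvZAux l s ↔ ∃ k : Nat, ∃ h : k < l.length, z = s + (k : Int) ∧ pvCost l[k] = 0 := by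
  induction l generalizing s with
  | nil => simp [pvZAux]
  | cons c rest ih =>
    constructor
    · intro hz
      by_cases hc : pvCost c = 0
      · simp only [pvZAux, if_pos hc, List.mem_cons] at hz
        rcases hz with rfl | hz
        · exact ⟨0, by simp, by simpa using hc⟩
        · rcases (ih (s + 1)).1 hz with ⟨k, hk, hzk, hck⟩
          exact ⟨k + 1, by simpa using hk, by push_cast; omega, by simpa using hck⟩
      · simp only [pvZAux, if_neg hc] at hz
        rcases (ih (s + 1)).1 hz with ⟨k, hk, hzk, hck⟩
        exact ⟨k + 1, by simpa using hk, by push_cast; omega, by simpa using hck⟩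
    · rintro ⟨k, hk, rfl, hck⟩
      cases k with
      | zero =>
        simp only [List.getElem_cons_zero] at hck
        simp [pvZAux, hck]
      | succ k =>
        simp only [List.getElem_cons_succ] at hck
        have hmem := (ih (s + 1)).2 ⟨k, by simpa using hk, by push_cast; ring, hck⟩
        by_cases hc : pvCost c = 0 <;>
            simp only [pvZAux, if_pos, hc, List.mem_cons]
        · right; exact hmem
        · exact hmem

theorem pvZAux_ge (l : List Char) (s : Int) : ∀ z ∈ pvZAux l s, s ≤ z := by
  intro z hz
  rcases (pvZAux_mem l s z).1 hz with ⟨k, _, rfl, _⟩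
  omega

theorem pvZAux_pairwise (l : List Char) (s : Int) : (pvZAux l s).Pairwise (· < ·) := by
  induction l generalizing s with
  | nil => simp [pvZAux]
  | cons c rest ih =>
    have hge := pvZAux_ge rest (s + 1)
    by_cases hc : pvCost c = 0 <;> simp only [pvZAux, if_pos, hc]
    · exact List.Pairwise.cons (fun z hz => by have := hge z hz; omega) (ih (s + 1))
    · exact ih (s + 1)

theorem pvNext_stop (cs : List Int) (n nxt : Int)
    (h : ¬ (nxt < n ∧ PySem.List.pyGetD cs nxt 0 = 0)) : pvNext cs n nxt = nxt := by
  rw [pvNext]; simp [h]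

theorem pvNext_run (cs : List Int) (r : Int) (k : Nat) : ∀ nxt : Int,
    (r + 1 - nxt).toNat = k → 0 ≤ nxt → nxt ≤ r + 1 → r + 1 ≤ (cs.length : Int) →
    (∀ j, nxt ≤ j → j ≤ r → PySem.List.pyGetD cs j 0 = 0) →
    (r + 1 = (cs.length : Int) ∨ PySem.List.pyGetD cs (r + 1) 0 ≠ 0) →
    pvNext cs (cs.length : Int) nxt = r + 1 := by
  induction k with
  | zero =>
    intro nxt h0 h1 h2 h3 hrun hend
    have : nxt = r + 1 := by omega
    subst this
    apply pvNext_stop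
    rcases hend with hend | hend
    · omega
    · tauto
  | succ k ih =>
    intro nxt h0 h1 h2 h3 hrun hend
    have hlt : nxt ≤ r := by omega
    rw [pvNext]
    rw [dif_pos ⟨by omega, hrun nxt le_rfl hlt⟩]
    exact ih (nxt + 1) (by omega) (by omega) (by omega) h3 (fun j hj1 hj2 => hrun j (by omega) hj2) hend

theorem foldl_fmin_le_init {α : Type} (f : α → Int) (l : List α) (a : Int) :
    l.foldl (fun m x => min m (f x)) a ≤ a := by
  induction l generalizing a with
  | nil => simp
  | cons x xs ih => exact le_trans (ih (min a (f x))) (min_le_left _ _)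

theorem foldl_fmin_le_mem {α : Type} (f : α → Int) (l : List α) (a : Int) {x : α} (hx : x ∈ l) :
    l.foldl (fun m x => min m (f x)) a ≤ f x := by
  induction l generalizing a with
  | nil => simp at hx
  | cons y ys ih =>
    rcases List.mem_cons.1 hx with rfl | hx'
    · exact le_trans (foldl_fmin_le_init f ys (min a (f x))) (min_le_right _ _)
    · exact ih (min a (f y)) hx'

theorem foldl_fmin_cases {α : Type} (f : α → Int) (l : List α) (a : Int) :
    l.foldl (fun m x => min m (f x)) a = a ∨ ∃ x ∈ l, l.foldl (fun m x => min m (f x)) a = f x := by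
  induction l generalizing a with
  | nil => left; rfl
  | cons x xs ih =>
    rcases ih (min a (f x)) with h | ⟨y, hy, h⟩
    · simp only [List.foldl_cons] at *
      rcases le_or_gt a (f x) with hle | hlt
      · left; rw [h]; omega
      · right; exact ⟨x, List.mem_cons_self, by rw [h]; omega⟩
    · right; exact ⟨y, List.mem_cons_of_mem _ hy, h⟩

-- A's first loop in closed form
theorem pvLoop1 (l : List Char) : ∀ (s : Int) (acc : List Int × List Int),
    (PySem.List.enumerate l s).foldl
      (fun (st : List Int × List Int) p =>
        let num := pvCost p.2
        (st.1 ++ [num], if num = 0 then st.2 ++ [p.1] else st.2)) acc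
    = (acc.1 ++ l.map pvCost, acc.2 ++ pvZAux l s) := by
  induction l with
  | nil => intro s acc; simp [PySem.List.enumerate_nil, pvZAux]
  | cons c rest ih =>
    intro s acc
    rw [PySem.List.enumerate_cons, List.foldl_cons, ih]
    by_cases hc : pvCost c = 0 <;> simp [pvZAux, hc]

-- A's second-loop body and finaliser, named
def pvF (ct : List (Int × Int) × List Int) (z : Int) : List (Int × Int) × List Int :=
  if ct.2 = [] then (ct.1, ct.2 ++ [z])
  else if z - PySem.List.pyGetD ct.2 (-1) 0 = 1 then (ct.1, ct.2 ++ [z])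
  else (ct.1 ++ [(PySem.List.pyGetD ct.2 0 0, PySem.List.pyGetD ct.2 (-1) 0)], [z])

def pvFin (ct : List (Int × Int) × List Int) : List (Int × Int) :=
  if ct.2 ≠ [] then ct.1 ++ [(PySem.List.pyGetD ct.2 0 0, PySem.List.pyGetD ct.2 (-1) 0)] else ct.1

def pvGrp : List Int → List (Int × Int)
  | [] => []
  | z :: zs => pvGrpAux z z zs

theorem pvFin_foldl : ∀ (zs : List Int) (cuts : List (Int × Int)) (t0 : Int) (ts : List Int),
    pvFin (zs.foldl pvF (cuts, t0 :: ts))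
      = cuts ++ pvGrpAux t0 ((t0 :: ts).getLast (by simp)) zs := by
  intro zs
  induction zs with
  | nil =>
    intro cuts t0 ts
    simp only [List.foldl_nil, pvFin, pvGrpAux]
    rw [if_pos (by simp)]
    rw [PySem.List.pyGetD_zero_cons, PySem.List.pyGetD_neg_one _ _ (by simp)]
  | cons z zs ih =>
    intro cuts t0 ts
    rw [List.foldl_cons]
    show pvFin (zs.foldl pvF (pvF (cuts, t0 :: ts) z)) = _
    rw [show pvF (cuts, t0 :: ts) z
        = (if z - (t0 :: ts).getLast (by simp) = 1 then (cuts, (t0 :: ts) ++ [z])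
           else (cuts ++ [(t0, (t0 :: ts).getLast (by simp))], [z])) by
      simp only [pvF]
      rw [if_neg (by simp), PySem.List.pyGetD_neg_one _ _ (by simp),
        PySem.List.pyGetD_zero_cons]]
    by_cases h : z - (t0 :: ts).getLast (by simp) = 1
    · rw [if_pos h]
      have hlast : (t0 :: (ts ++ [z])).getLast (by simp) = z := by
        have h3 := List.getLast_concat (a := z) (l := t0 :: ts)
        simpa using h3
      simp only [List.cons_append]
      rw [ih cuts t0 (ts ++ [z]), hlast]
      simp only [pvGrpAux, if_pos h]
    · rw [if_neg h]
      have h2 := ih (cuts ++ [(t0, (t0 :: ts).getLast (by simp))]) z []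
      simp only [List.getLast_singleton] at h2
      rw [h2]
      simp [pvGrpAux, if_neg h]

theorem pvFin_grp (zs : List Int) : pvFin (zs.foldl pvF ([], [])) = pvGrp zs := by
  cases zs with
  | nil => simp [pvFin, pvGrp]
  | cons z zs =>
    rw [List.foldl_cons, show pvF ([], []) z = (([] : List (Int × Int)), [z]) by simp [pvF],
      pvFin_foldl zs [] z []]
    simp [pvGrp]

theorem pvGrpAux_sound (cs : List Int) : ∀ (zs : List Int) (l cur : Int),
    zs.Pairwise (· < ·) →
    (∀ z ∈ zs, cur < z) →
    (∀ z ∈ zs, 0 ≤ z ∧ z < (cs.length : Int) ∧ PySem.List.pyGetD cs z 0 = 0) →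
    (∀ j : Int, cur < j → j < (cs.length : Int) → PySem.List.pyGetD cs j 0 = 0 → j ∈ zs) →
    (∀ j : Int, l ≤ j → j ≤ cur → PySem.List.pyGetD cs j 0 = 0) →
    (l = 0 ∨ PySem.List.pyGetD cs (l - 1) 0 ≠ 0) →
    0 ≤ l → l ≤ cur → cur < (cs.length : Int) →
    ∀ p ∈ pvGrpAux l cur zs, pvIsCut cs p.1 p.2 := by
  intro zs
  induction zs with
  | nil =>
    intro l cur _ _ _ hcomp hrun hleft hl0 hlc hcn p hp
    simp only [pvGrpAux, List.mem_singleton] at hp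
    subst hp
    refine ⟨hl0, hlc, hcn, hrun, hleft, ?_⟩
    by_cases hend : cur = (cs.length : Int) - 1
    · exact Or.inl hend
    · refine Or.inr (fun hz => ?_)
      have h9 := hcomp (cur + 1) (by omega) (by omega) hz
      simp at h9
  | cons z zs ih =>
    intro l cur hpw hgt hmem hcomp hrun hleft hl0 hlc hcn p hp
    have hzgt : cur < z := hgt z List.mem_cons_self
    have hzmem := hmem z List.mem_cons_self
    have hpw' := (List.pairwise_cons.1 hpw).2
    have hzlt := (List.pairwise_cons.1 hpw).1
    by_cases h : z - cur = 1
    · rw [pvGrpAux, if_pos h] at hp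
      refine ih l z hpw' hzlt
        (fun y hy => hmem y (List.mem_cons_of_mem _ hy))
        (fun j hj1 hj2 hj3 => ?_)
        (fun j hj1 hj2 => ?_) hleft hl0 (by omega) hzmem.2.1 p hp
      · rcases List.mem_cons.1 (hcomp j (by omega) hj2 hj3) with rfl | hj
        · omega
        · exact hj
      · by_cases hj : j ≤ cur
        · exact hrun j hj1 hj
        · have : j = z := by omega
          subst this; exact hzmem.2.2
    · rw [pvGrpAux, if_neg h] at hp
      rcases List.mem_cons.1 hp with rfl | hp
      · refine ⟨hl0, hlc, hcn, hrun, hleft, ?_⟩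
        refine Or.inr (fun hzero => ?_)
        have hn : cur + 1 < (cs.length : Int) := by omega
        rcases List.mem_cons.1 (hcomp (cur + 1) (by omega) hn hzero) with heq | hin
        · omega
        · have := hzlt _ hin; omega
      · refine ih z z hpw' hzlt
          (fun y hy => hmem y (List.mem_cons_of_mem _ hy))
          (fun j hj1 hj2 hj3 => ?_)
          (fun j hj1 hj2 => by cases (by omega : j = z); exact hzmem.2.2)
          ?_ (by omega) le_rfl hzmem.2.1 p hp
        · rcases List.mem_cons.1 (hcomp j (by omega) hj2 hj3) with rfl | hj
          · omega
          · exact hj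
        · refine Or.inr (fun hzero => ?_)
          have hb : z - 1 < (cs.length : Int) := by omega
          rcases List.mem_cons.1 (hcomp (z - 1) (by omega) hb hzero) with heq | hin
          · omega
          · have := hzlt _ hin; omega

theorem pvGrpAux_complete : ∀ (zs : List Int) (l cur : Int),
    zs.Pairwise (· < ·) →
    (∀ z ∈ zs, cur < z) →
    l ≤ cur →
    ∀ j : Int, ((l ≤ j ∧ j ≤ cur) ∨ j ∈ zs) →
    ∃ p ∈ pvGrpAux l cur zs, p.1 ≤ j ∧ j ≤ p.2 := by
  intro zs
  induction zs with
  | nil =>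
    intro l cur _ _ _ j hj
    simp only [List.not_mem_nil, or_false] at hj
    exact ⟨(l, cur), List.mem_singleton.2 rfl, hj.1, hj.2⟩
  | cons z zs ih =>
    intro l cur hpw hgt hlc j hj
    have hzgt : cur < z := hgt z List.mem_cons_self
    have hpw' := (List.pairwise_cons.1 hpw).2
    have hzlt := (List.pairwise_cons.1 hpw).1
    by_cases h : z - cur = 1
    · rw [pvGrpAux, if_pos h]
      refine ih l z hpw' hzlt (by omega) j ?_
      rcases hj with ⟨h1, h2⟩ | hj
      · exact Or.inl ⟨h1, by omega⟩
      · rcases List.mem_cons.1 hj with rfl | hj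
        · exact Or.inl ⟨by omega, le_rfl⟩
        · exact Or.inr hj
    · rw [pvGrpAux, if_neg h]
      rcases hj with ⟨h1, h2⟩ | hj
      · exact ⟨(l, cur), List.mem_cons_self, h1, h2⟩
      · rcases List.mem_cons.1 hj with rfl | hj'
        · rcases ih j j hpw' hzlt le_rfl j (Or.inl ⟨le_rfl, le_rfl⟩) with ⟨p, hp, hle⟩
          exact ⟨p, List.mem_cons_of_mem _ hp, hle⟩
        · rcases ih z z hpw' hzlt le_rfl j (Or.inr hj') with ⟨p, hp, hle⟩
          exact ⟨p, List.mem_cons_of_mem _ hp, hle⟩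

-- the two candidate values
def pvCandA (N : Int) (p : Int × Int) : Int :=
  let minc0 := min (p.1 - 1) (N - p.2 - 1)
  let maxc0 := max (p.1 - 1) (N - p.2 - 1)
  (if minc0 < 0 then 0 else minc0) * 2 + (if maxc0 < 0 then 0 else maxc0)

def pvCandB (cs : List Int) (i : Int) : Int :=
  min (2 * i + ((cs.length : Int) - pvNext cs (cs.length : Int) (i + 1)))
    (i + 2 * ((cs.length : Int) - pvNext cs (cs.length : Int) (i + 1)))

-- (i) every cut's candidate is hit by B at index max(l-1, 0)
theorem pvCut_to_B (cs : List Int) (p : Int × Int) (hcut : pvIsCut cs p.1 p.2) :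
    ∃ i : Int, 0 ≤ i ∧ i < (cs.length : Int) ∧ pvCandB cs i = pvCandA (cs.length : Int) p := by
  obtain ⟨h0, hlr, hrn, hrun, _, hright⟩ := hcut
  refine ⟨max (p.1 - 1) 0, by omega, by omega, ?_⟩
  have hnext : pvNext cs (cs.length : Int) (max (p.1 - 1) 0 + 1) = p.2 + 1 := by
    apply pvNext_run cs p.2 (p.2 + 1 - (max (p.1 - 1) 0 + 1)).toNat
    · rfl
    · omega
    · omega
    · omega
    · intro j hj1 hj2; exact hrun j (by omega) hj2
    · rcases hright with h | h
      · exact Or.inl (by omega)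
      · exact Or.inr h
  simp only [pvCandB, pvCandA, hnext]
  split_ifs <;> omega

-- (ii) every B candidate is dominated by n-1 or by some cut's candidate
theorem pvB_lb (cs : List Int) (cuts : List (Int × Int))
    (hsound : ∀ p ∈ cuts, pvIsCut cs p.1 p.2)
    (hcomp : ∀ j : Int, 0 ≤ j → j < (cs.length : Int) → PySem.List.pyGetD cs j 0 = 0 →
      ∃ p ∈ cuts, p.1 ≤ j ∧ j ≤ p.2)
    (i : Int) (h0 : 0 ≤ i) (h1 : i < (cs.length : Int)) :
    ((cs.length : Int) - 1 ≤ pvCandB cs i) ∨ ∃ p ∈ cuts, pvCandA (cs.length : Int) p ≤ pvCandB cs i := by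
  by_cases h : i + 1 < (cs.length : Int) ∧ PySem.List.pyGetD cs (i + 1) 0 = 0
  · rcases hcomp (i + 1) (by omega) h.1 h.2 with ⟨p, hp, hj1, hj2⟩
    obtain ⟨hc0, hclr, hcrn, hcrun, _, hcright⟩ := hsound p hp
    have hnext : pvNext cs (cs.length : Int) (i + 1) = p.2 + 1 := by
      apply pvNext_run cs p.2 (p.2 + 1 - (i + 1)).toNat
      · rfl
      · omega
      · omega
      · omega
      · intro j hj hj'; exact hcrun j (by omega) hj'
      · rcases hcright with hh | hh
        · exact Or.inl (by omega)
        · exact Or.inr hh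
    refine Or.inr ⟨p, hp, ?_⟩
    simp only [pvCandB, pvCandA, hnext]
    split_ifs <;> omega
  · have hnext : pvNext cs (cs.length : Int) (i + 1) = i + 1 := pvNext_stop _ _ _ h
    left
    simp only [pvCandB, hnext]
    omega

-- the two move folds agree
theorem pvMoves_eq (cs : List Int) (cuts : List (Int × Int))
    (hsound : ∀ p ∈ cuts, pvIsCut cs p.1 p.2)
    (hcomp : ∀ j : Int, 0 ≤ j → j < (cs.length : Int) → PySem.List.pyGetD cs j 0 = 0 →
      ∃ p ∈ cuts, p.1 ≤ j ∧ j ≤ p.2) :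
    cuts.foldl (fun m c => min m (pvCandA (cs.length : Int) c)) ((cs.length : Int) - 1)
      = (PySem.List.pyRange 0 (cs.length : Int) 1).foldl
          (fun m i => min m (pvCandB cs i)) ((cs.length : Int) - 1) := by
  set N : Int := (cs.length : Int) with hN
  apply le_antisymm
  · rcases foldl_fmin_cases (pvCandB cs) (PySem.List.pyRange 0 N 1) (N - 1) with hB | ⟨i, hi, hB⟩
    · rw [hB]
      exact foldl_fmin_le_init _ _ _
    · rw [hB]
      have hi' := (PySem.List.mem_pyRange_one).1 hi
      rcases pvB_lb cs cuts hsound hcomp i hi'.1 hi'.2 with hge | ⟨p, hp, hge⟩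
      · exact le_trans (foldl_fmin_le_init _ _ _) hge
      · exact le_trans (foldl_fmin_le_mem _ _ _ hp) hge
  · rcases foldl_fmin_cases (pvCandA N) cuts (N - 1) with hA | ⟨p, hp, hA⟩
    · rw [hA]
      exact foldl_fmin_le_init _ _ _
    · rw [hA]
      rcases pvCut_to_B cs p (hsound p hp) with ⟨i, h0, h1, heq⟩
      rw [← heq]
      exact foldl_fmin_le_mem _ _ _ (PySem.List.mem_pyRange_one.2 ⟨h0, h1⟩)

-- membership/order description of A's zero-index list
theorem pvMem_zeros (l : List Char) (z : Int) :
    z ∈ pvZAux l 0 ↔ 0 ≤ z ∧ z < ((l.map pvCost).length : Int) ∧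
      PySem.List.pyGetD (l.map pvCost) z 0 = 0 := by
  rw [pvZAux_mem]
  constructor
  · rintro ⟨k, hk, rfl, hck⟩
    refine ⟨by omega, by simp; omega, ?_⟩
    have : ((0 : Int) + (k : Int)) = ((k : Nat) : Int) := by omega
    rw [this, PySem.List.pyGetD_natCast, List.getD_eq_getElem _ _ (by simpa using hk),
      List.getElem_map]
    exact hck
  · rintro ⟨h0, hn, hz⟩
    have hk : z.toNat < l.length := by simp at hn; omega
    refine ⟨z.toNat, hk, by omega, ?_⟩
    have : z = ((z.toNat : Nat) : Int) := by omega
    rw [this, PySem.List.pyGetD_natCast, List.getD_eq_getElem _ _ (by simpa using hk),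
      List.getElem_map] at hz
    exact hz

-- A's cuts are exactly the maximal zero runs, and they cover every zero position
theorem pvGrp_spec (l : List Char) :
    (∀ p ∈ pvGrp (pvZAux l 0), pvIsCut (l.map pvCost) p.1 p.2) ∧
    (∀ j : Int, 0 ≤ j → j < ((l.map pvCost).length : Int) →
      PySem.List.pyGetD (l.map pvCost) j 0 = 0 →
      ∃ p ∈ pvGrp (pvZAux l 0), p.1 ≤ j ∧ j ≤ p.2) := by
  have hpwz := pvZAux_pairwise l 0
  have hmemz := pvMem_zeros l
  cases hzs : pvZAux l 0 with
  | nil =>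
    refine ⟨by simp [pvGrp], fun j h0 hn hz => ?_⟩
    have hmem := (hmemz j).2 ⟨h0, hn, hz⟩
    rw [hzs] at hmem
    simp at hmem
  | cons z rest =>
    rw [hzs] at hpwz hmemz
    have hpw' := (List.pairwise_cons.1 hpwz).2
    have hzlt := (List.pairwise_cons.1 hpwz).1
    have hzself := (hmemz z).1 List.mem_cons_self
    constructor
    · intro p hp
      refine pvGrpAux_sound (l.map pvCost) rest z z hpw' hzlt
        (fun y hy => (hmemz y).1 (List.mem_cons_of_mem _ hy))
        (fun j hj1 hj2 hj3 => ?_)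
        (fun j hj1 hj2 => by cases (by omega : j = z); exact hzself.2.2)
        ?_ hzself.1 le_rfl hzself.2.1 p (by simpa [pvGrp] using hp)
      · rcases List.mem_cons.1 ((hmemz j).2 ⟨by omega, hj2, hj3⟩) with rfl | hj
        · omega
        · exact hj
      · by_cases hz0 : z = 0
        · exact Or.inl hz0
        · refine Or.inr (fun hzero => ?_)
          rcases List.mem_cons.1 ((hmemz (z - 1)).2
              ⟨by omega, by omega, hzero⟩) with heq | hin
          · omega
          · have := hzlt _ hin; omega
    · intro j h0 hn hz
      have hj := List.mem_cons.1 ((hmemz j).2 ⟨h0, hn, hz⟩)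
      have : ∃ p ∈ pvGrpAux z z rest, p.1 ≤ j ∧ j ≤ p.2 := by
        apply pvGrpAux_complete rest z z hpw' hzlt le_rfl j
        rcases hj with rfl | hj
        · exact Or.inl ⟨le_rfl, le_rfl⟩
        · exact Or.inr hj
      simpa [pvGrp] using this

theorem pvSolutionA_eq (name : String) :
    solution name = (name.toList.map pvCost).sum +
      (pvGrp (pvZAux name.toList 0)).foldl
        (fun m c => min m (pvCandA (((name.toList.map pvCost).length : Int)) c))
        (((name.toList.map pvCost).length : Int) - 1) := by
  simp only [solution]
  rw [pvLoop1 name.toList 0 ([], [])]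
  simp only [List.nil_append]
  have h2 : List.foldl
      (fun (ct : List (Int × Int) × List Int) i =>
        if ct.2 = [] then (ct.1, ct.2 ++ [PySem.List.pyGetD (pvZAux name.toList 0) i 0])
        else
          if PySem.List.pyGetD (pvZAux name.toList 0) i 0 - PySem.List.pyGetD ct.2 (-1) 0 = 1 then
            (ct.1, ct.2 ++ [PySem.List.pyGetD (pvZAux name.toList 0) i 0])
          else
            (ct.1 ++ [(PySem.List.pyGetD ct.2 0 0, PySem.List.pyGetD ct.2 (-1) 0)],
              [PySem.List.pyGetD (pvZAux name.toList 0) i 0]))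
      ([], []) (PySem.List.pyRange 0 (PySem.List.len (pvZAux name.toList 0)))
      = List.foldl pvF ([], []) (pvZAux name.toList 0) :=
    PySem.List.foldl_pyRange_zero_pyGetD' (pvZAux name.toList 0) 0 pvF ([], [])
  rw [h2]
  have h3 : (if (List.foldl pvF ([], []) (pvZAux name.toList 0)).2 ≠ [] then
        (List.foldl pvF ([], []) (pvZAux name.toList 0)).1 ++
          [(PySem.List.pyGetD (List.foldl pvF ([], []) (pvZAux name.toList 0)).2 0 0,
            PySem.List.pyGetD (List.foldl pvF ([], []) (pvZAux name.toList 0)).2 (-1) 0)]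
      else (List.foldl pvF ([], []) (pvZAux name.toList 0)).1) = pvGrp (pvZAux name.toList 0) :=
    pvFin_grp (pvZAux name.toList 0)
  rw [h3]
  rw [show PySem.Str.len name = ((List.map pvCost name.toList).length : Int) by
    simp [PySem.Str.len]]
  congr 1

theorem pvSolutionB_eq (name : String) :
    solution_alt name = (name.toList.map pvCost).sum +
      (PySem.List.pyRange 0 (((name.toList.map pvCost).length : Int)) 1).foldl
        (fun m i => min m (pvCandB (name.toList.map pvCost) i))
        (((name.toList.map pvCost).length : Int) - 1) := by
  simp only [solution_alt, PySem.List.len_eq]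
  congr 1
  apply List.foldl_ext
  intro m i _
  simp only [pvCandB, min_assoc]

-- ===== VERDICT (by name: the statement is the Claim_ definition above) =====
theorem solution_spec : Claim_equal_solution := by
  unfold Claim_equal_solution Spec_solution
  intro name _
  obtain ⟨hsound, hcomp⟩ := pvGrp_spec name.toList
  rw [pvSolutionA_eq, pvSolutionB_eq, pvMoves_eq (name.toList.map pvCost) _ hsound hcomp]
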